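-- pv_equiv track=rewrite | github.com/Brandon0304/ProyectoFinal_nuclearVeterinaria | ec/app/search_utils.py | find_similar_terms
-- ===== SOURCE A (Python) =====
-- def get_levenshtein_distance(s1, s2):
--     """
--     Calcula la distancia de Levenshtein entre dos cadenas.
--     Esta métrica mide cuántos cambios (inserciones, eliminaciones o sustituciones)
--     son necesarios para transformar una cadena en otra.
--     """
--     if len(s1) < len(s2):
--         return get_levenshtein_distance(s2, s1)
--
--     if len(s2) == 0:
--         return len(s1)
--
--     previous_row = range(len(s2) + 1)
--     for i, c1 in enumerate(s1):
--         current_row = [i + 1]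
--         for j, c2 in enumerate(s2):
--             insertions = previous_row[j + 1] + 1
--             deletions = current_row[j] + 1
--             substitutions = previous_row[j] + (c1 != c2)
--             current_row.append(min(insertions, deletions, substitutions))
--         previous_row = current_row
--
--     return previous_row[-1]
--
-- def find_similar_terms(query_term, term_dict, threshold=2):
--     """
--     Encuentra términos similares al término de consulta basados en la distancia de Levenshtein.
--     Devuelve el término más cercano si está dentro del umbral.
--     """
--     if query_term in term_dict:
--         return query_term
--
--     best_match = None
--     best_distance = float('inf')
--
--     for term in term_dict.keys():
--         distance = get_levenshtein_distance(query_term, term)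
--         if distance < best_distance and distance <= threshold:
--             best_distance = distance
--             best_match = term
--
--     return best_match
-- ===== SOURCE B (Python) =====
-- def _lev(s, t):
--     """Levenshtein distance, top-down memoized recursion on prefix lengths."""
--     memo = {}
--     def d(i, j):
--         if i == 0:
--             return j
--         if j == 0:
--             return i
--         key = (i, j)
--         if key not in memo:
--             memo[key] = min(d(i - 1, j) + 1,
--                             d(i, j - 1) + 1,
--                             d(i - 1, j - 1) + (s[i - 1] != t[j - 1]))
--         return memo[key]
--     return d(len(s), len(t))
--
--
-- def find_similar_terms(query_term, term_dict, threshold=2):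
--     if query_term in term_dict:
--         return query_term
--
--     # terms whose length differs by more than threshold can never be within
--     # threshold (Levenshtein distance >= length difference), so skip them
--     candidates = [t for t in term_dict
--                   if abs(len(query_term) - len(t)) <= threshold]
--     ds = [_lev(query_term, t) for t in candidates]
--     eligible = [d for d in ds if d <= threshold]
--     if not eligible:
--         return None
--     return candidates[ds.index(min(eligible))]
-- ===== Notes on version B (the rewrite author's own statement) =====
-- stated objective: faster
-- what changed: A runs a bottom-up two-row Wagner-Fischer DP on every dict key and keeps a running best; B first discards keys whose length differs from the query by more than the threshold (Levenshtein distance is at least the length difference), computes the remaining distances by top-down memoized recursion on prefix lengths, and selects the answer by min over the eligible distances plus first-index lookup.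
import Mathlib
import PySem

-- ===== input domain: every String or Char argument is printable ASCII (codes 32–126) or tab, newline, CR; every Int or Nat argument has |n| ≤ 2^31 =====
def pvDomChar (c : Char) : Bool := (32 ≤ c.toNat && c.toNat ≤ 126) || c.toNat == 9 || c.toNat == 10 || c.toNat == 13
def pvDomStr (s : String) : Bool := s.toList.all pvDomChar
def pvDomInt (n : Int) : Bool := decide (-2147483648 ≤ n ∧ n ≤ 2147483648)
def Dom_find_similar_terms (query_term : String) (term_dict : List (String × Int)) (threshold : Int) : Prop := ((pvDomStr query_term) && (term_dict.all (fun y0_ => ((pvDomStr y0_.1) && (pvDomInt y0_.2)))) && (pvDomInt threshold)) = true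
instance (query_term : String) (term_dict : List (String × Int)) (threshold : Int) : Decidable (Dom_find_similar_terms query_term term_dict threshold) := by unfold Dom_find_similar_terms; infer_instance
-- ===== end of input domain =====

-- B replaces A's per-term two-row DP by a length-difference prefilter plus a
-- top-down (memoized in Python) recursive Levenshtein, selecting the answer by
-- min/index instead of a running-best loop; return values are proved equal.

-- ===== PORT A =====

-- min(x, y, z)
def pvMin3 (a b c : Nat) : Nat := min (min a b) c

-- inner/outer DP loops of get_levenshtein_distance (after the swap).
-- enumerate(s) is ported as List.zipIdx (indices 0..len-1, nonnegative, so exact);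
-- previous_row[j+1], previous_row[j], current_row[j] are always in range, so
-- List.getD is exact; previous_row[-1] on a nonempty row is getLast?.getD 0 (exact).
def pvGldCore (s1 s2 : List Char) : Nat :=
  if s2.length = 0 then s1.length
  else
    let final :=
      s1.zipIdx.foldl
        (fun previous_row ci =>
          s2.zipIdx.foldl
            (fun current_row cj =>
              let insertions := previous_row.getD (cj.2 + 1) 0 + 1
              let deletions := current_row.getD cj.2 0 + 1
              let substitutions := previous_row.getD cj.2 0 + (if ci.1 ≠ cj.1 then 1 else 0)
              current_row ++ [pvMin3 insertions deletions substitutions])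
            [ci.2 + 1])
        (List.range (s2.length + 1))
    final.getLast?.getD 0

-- get_levenshtein_distance: the Python recursion only ever swaps once (the
-- recursive call's guard is then false), so it is flattened into one `if`; exact.
def pvGld (s1 s2 : List Char) : Nat :=
  if s1.length < s2.length then pvGldCore s2 s1 else pvGldCore s1 s2

-- keys of the dict represented by the association list: first occurrences, in order
def pvKeys (term_dict : List (String × Int)) : List String :=
  PySem.List.dedup (term_dict.map (·.1))

-- `distance < best_distance` with best_distance initially float('inf'): none = inf
def pvImproves (bd : Option Nat) (d : Nat) : Bool :=
  match bd with
  | none => true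
  | some b => decide (d < b)

-- one iteration of A's search loop (state = (best_match, best_distance))
def pvStepA (query_term : String) (threshold : Int)
    (st : Option String × Option Nat) (term : String) : Option String × Option Nat :=
  let distance := pvGld query_term.toList term.toList
  if pvImproves st.2 distance && decide ((distance : Int) ≤ threshold) then
    (some term, some distance)
  else st

def find_similar_terms (query_term : String) (term_dict : List (String × Int)) (threshold : Int) : Option String :=
  let keys := pvKeys term_dict
  if query_term ∈ keys then some query_term
  else (keys.foldl (pvStepA query_term threshold) (none, none)).1

-- ===== PORT B =====

-- Source B's memoized recursion d(i, j) on prefix lengths; memoization elided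
-- (same recursion, same values). s[i-1]/t[j-1] are in range, so getD is exact.
def pvLevPre (s t : List Char) : Nat → Nat → Nat
  | 0, j => j
  | i+1, 0 => i + 1
  | i+1, j+1 =>
      pvMin3 (pvLevPre s t i (j+1) + 1) (pvLevPre s t (i+1) j + 1)
        (pvLevPre s t i j + (if s.getD i ' ' ≠ t.getD j ' ' then 1 else 0))
  termination_by i j => (i, j)

-- _lev(s, t) = d(len(s), len(t))
def pvLevB (s t : String) : Nat := pvLevPre s.toList t.toList s.toList.length t.toList.length

def find_similar_terms_alt (query_term : String) (term_dict : List (String × Int)) (threshold : Int) : Option String :=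
  let keys := pvKeys term_dict
  if query_term ∈ keys then some query_term
  else
    let candidates := keys.filter
      (fun t => decide (|PySem.Str.len query_term - PySem.Str.len t| ≤ threshold))
    let ds := candidates.map (fun t => pvLevB query_term t)
    let eligible := ds.filter (fun (d : Nat) => decide ((d : Int) ≤ threshold))
    if eligible.isEmpty then none
    else
      match PySem.List.min? eligible (fun d => d) with
      | none => none   -- unreachable: eligible is nonempty
      | some m =>
        match PySem.List.index? ds m with
        | none => none -- unreachable: m is an element of ds
        | some i => PySem.List.pyGet? candidates (i : Int)

-- ===== PRECONDITION & SPEC =====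
def Spec_find_similar_terms (query_term : String) (term_dict : List (String × Int)) (threshold : Int) (out : Option String) : Prop := out = find_similar_terms_alt query_term term_dict threshold
instance (query_term : String) (term_dict : List (String × Int)) (threshold : Int) (out : Option String) : Decidable (Spec_find_similar_terms query_term term_dict threshold out) := by unfold Spec_find_similar_terms; infer_instance

-- ===== CLAIM (what is proved, stated in full; the proofs are below) =====
def Claim_equal_find_similar_terms : Prop := ∀ (query_term : String) (term_dict : List (String × Int)) (threshold : Int), Dom_find_similar_terms query_term term_dict threshold → Spec_find_similar_terms query_term term_dict threshold (find_similar_terms query_term term_dict threshold)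

-- ===== LEMMAS AND PROOFS =====

lemma pvLevPre_zero_right (s t : List Char) (i : Nat) : pvLevPre s t i 0 = i := by
  cases i <;> simp [pvLevPre]

lemma pvLevPre_zero_left (s t : List Char) (j : Nat) : pvLevPre s t 0 j = j := by
  simp [pvLevPre]

lemma pvLevPre_succ_succ (s t : List Char) (i j : Nat) :
    pvLevPre s t (i+1) (j+1) =
      pvMin3 (pvLevPre s t i (j+1) + 1) (pvLevPre s t (i+1) j + 1)
        (pvLevPre s t i j + (if s.getD i ' ' ≠ t.getD j ' ' then 1 else 0)) := by
  rw [pvLevPre]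

-- symmetry of the recursion
lemma pvLevPre_symm (s t : List Char) :
    ∀ (k i j : Nat), i + j ≤ k → pvLevPre s t i j = pvLevPre t s j i := by
  intro k
  induction k with
  | zero =>
    intro i j h
    have hi : i = 0 := by omega
    have hj : j = 0 := by omega
    subst hi; subst hj
    simp [pvLevPre_zero_right]
  | succ k ih =>
    intro i j h
    match i, j with
    | 0, j => simp [pvLevPre_zero_left, pvLevPre_zero_right]
    | i+1, 0 => simp [pvLevPre_zero_left, pvLevPre_zero_right]
    | i+1, j+1 =>
      rw [pvLevPre_succ_succ, pvLevPre_succ_succ]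
      rw [ih i (j+1) (by omega), ih (i+1) j (by omega), ih i j (by omega)]
      have hcost : (if s.getD i ' ' ≠ t.getD j ' ' then (1:Nat) else 0) =
          (if t.getD j ' ' ≠ s.getD i ' ' then (1:Nat) else 0) := by
        by_cases hc : s.getD i ' ' = t.getD j ' ' <;> simp [Ne, eq_comm]
      rw [hcost]
      unfold pvMin3
      omega

-- lower bound: the distance dominates the length difference
lemma pvLevPre_lb (s t : List Char) :
    ∀ (k i j : Nat), i + j ≤ k →
      j ≤ i + pvLevPre s t i j ∧ i ≤ j + pvLevPre s t i j := by
  intro k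
  induction k with
  | zero =>
    intro i j h
    have hi : i = 0 := by omega
    have hj : j = 0 := by omega
    subst hi; subst hj; simp [pvLevPre_zero_left]
  | succ k ih =>
    intro i j h
    match i, j with
    | 0, j => simp [pvLevPre_zero_left]
    | i+1, 0 => simp [pvLevPre_zero_right]
    | i+1, j+1 =>
      rw [pvLevPre_succ_succ]
      have h1 := ih i (j+1) (by omega)
      have h2 := ih (i+1) j (by omega)
      have h3 := ih i j (by omega)
      unfold pvMin3
      by_cases hc : s.getD i ' ' = t.getD j ' ' <;> simp <;> omega

-- the full row of DP values for prefix length i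
def pvRowSpec (s t : List Char) (i : Nat) : List Nat :=
  (List.range (t.length + 1)).map (fun j => pvLevPre s t i j)

lemma pvRowSpec_getD (s t : List Char) (i j : Nat) (h : j ≤ t.length) :
    (pvRowSpec s t i).getD j 0 = pvLevPre s t i j := by
  simp [pvRowSpec, List.getD_eq_getElem?_getD, Nat.lt_succ_of_le h]

lemma pvRowSpec_zero (s t : List Char) : pvRowSpec s t 0 = List.range (t.length + 1) := by
  simp [pvRowSpec, pvLevPre_zero_left]

lemma pvRowSpec_cons (s t : List Char) (i : Nat) :
    pvRowSpec s t i
      = pvLevPre s t i 0 :: (List.range' 1 t.length).map (fun j => pvLevPre s t i j) := by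
  simp [pvRowSpec, List.range_eq_range', List.range'_succ]

-- the inner loop over s2 computes the next DP row
lemma pvInner (s t : List Char) (i : Nat) (c1 : Char) (hc1 : c1 = s.getD i ' ')
    (prev : List Nat) (hprev : ∀ j, j ≤ t.length → prev.getD j 0 = pvLevPre s t i j) :
    ∀ (u : List Char) (j0 : Nat), t.drop j0 = u → ∀ (cur : List Nat),
      cur.length = j0 + 1 → cur.getD j0 0 = pvLevPre s t (i+1) j0 →
      (u.zipIdx j0).foldl
        (fun current_row cj =>
          let insertions := prev.getD (cj.2 + 1) 0 + 1
          let deletions := current_row.getD cj.2 0 + 1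
          let substitutions := prev.getD cj.2 0 + (if c1 ≠ cj.1 then 1 else 0)
          current_row ++ [pvMin3 insertions deletions substitutions])
        cur
      = cur ++ (List.range' (j0+1) u.length).map (fun j => pvLevPre s t (i+1) j) := by
  intro u
  induction u with
  | nil => intro j0 _ cur _ _; simp
  | cons c2 u' ihu =>
    intro j0 hdrop cur hlen hcurD
    have hj0 : j0 < t.length := by
      have := congrArg List.length hdrop
      simp at this; omega
    have ht : t.getD j0 ' ' = c2 := by
      have h0 : (t.drop j0)[0]? = t[j0]? := by
        rw [List.getElem?_drop]; norm_num
      rw [hdrop] at h0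
      simp at h0
      simp [List.getD_eq_getElem?_getD, ← h0]
    have hu' : t.drop (j0 + 1) = u' := by
      have hdd : (t.drop j0).drop 1 = t.drop (j0 + 1) := List.drop_drop
      rw [hdrop] at hdd
      simpa using hdd.symm
    rw [List.zipIdx_cons, List.foldl_cons]
    have hval : cur ++ [pvMin3 (prev.getD (j0 + 1) 0 + 1) (cur.getD j0 0 + 1)
          (prev.getD j0 0 + (if c1 ≠ c2 then 1 else 0))]
        = cur ++ [pvLevPre s t (i+1) (j0+1)] := by
      rw [hprev (j0+1) (by omega), hprev j0 (by omega), hcurD,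
        pvLevPre_succ_succ, hc1, ht]
    simp only []
    rw [hval]
    have hnext := ihu (j0+1) hu' (cur ++ [pvLevPre s t (i+1) (j0+1)])
      (by simp [hlen]) (by simp [List.getD_eq_getElem?_getD, hlen])
    rw [hnext]
    rw [show (c2 :: u').length = u'.length + 1 from by simp, List.range'_succ]
    simp

-- the outer loop over s1 computes the final DP row
lemma pvOuter (s t : List Char) :
    ∀ (w : List Char) (i0 : Nat), s.drop i0 = w → i0 ≤ s.length →
      (w.zipIdx i0).foldl
        (fun previous_row ci =>
          t.zipIdx.foldl
            (fun current_row cj =>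
              let insertions := previous_row.getD (cj.2 + 1) 0 + 1
              let deletions := current_row.getD cj.2 0 + 1
              let substitutions := previous_row.getD cj.2 0 + (if ci.1 ≠ cj.1 then 1 else 0)
              current_row ++ [pvMin3 insertions deletions substitutions])
            [ci.2 + 1])
        (pvRowSpec s t i0)
      = pvRowSpec s t s.length := by
  intro w
  induction w with
  | nil =>
    intro i0 hdrop hle
    have : i0 = s.length := by
      have := congrArg List.length hdrop
      simp at this; omega
    simp [this]
  | cons c1 w' ihw =>
    intro i0 hdrop hle
    have hi0 : i0 < s.length := by
      have := congrArg List.length hdrop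
      simp at this; omega
    have hs : s.getD i0 ' ' = c1 := by
      have h0 : (s.drop i0)[0]? = s[i0]? := by rw [List.getElem?_drop]; norm_num
      rw [hdrop] at h0
      simp at h0
      simp [List.getD_eq_getElem?_getD, ← h0]
    have hw' : s.drop (i0 + 1) = w' := by
      have hdd : (s.drop i0).drop 1 = s.drop (i0 + 1) := List.drop_drop
      rw [hdrop] at hdd
      simpa using hdd.symm
    rw [List.zipIdx_cons, List.foldl_cons]
    have hinner := pvInner s t i0 c1 hs.symm (pvRowSpec s t i0)
      (fun j hj => pvRowSpec_getD s t i0 j hj) t 0 rfl [i0 + 1]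
      (by simp) (by simp [pvLevPre_zero_right])
    have hrow : [i0 + 1] ++ (List.range' 1 t.length).map (fun j => pvLevPre s t (i0+1) j)
        = pvRowSpec s t (i0+1) := by
      rw [pvRowSpec_cons, pvLevPre_zero_right]
      rfl
    rw [show (t.zipIdx.foldl
        (fun current_row cj =>
          let insertions := (pvRowSpec s t i0).getD (cj.2 + 1) 0 + 1
          let deletions := current_row.getD cj.2 0 + 1
          let substitutions := (pvRowSpec s t i0).getD cj.2 0 + (if c1 ≠ cj.1 then 1 else 0)
          current_row ++ [pvMin3 insertions deletions substitutions])
        [i0 + 1]) = pvRowSpec s t (i0+1) from by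
      rw [show t.zipIdx = t.zipIdx 0 from rfl, hinner]
      simpa using hrow]
    exact ihw (i0+1) hw' (by omega)

lemma pvRowSpec_last (s t : List Char) (i : Nat) :
    (pvRowSpec s t i).getLast?.getD 0 = pvLevPre s t i t.length := by
  unfold pvRowSpec
  rw [List.getLast?_map, List.range_succ, List.getLast?_concat]
  rfl

lemma pvGldCore_eq (s t : List Char) : pvGldCore s t = pvLevPre s t s.length t.length := by
  unfold pvGldCore
  split
  · next h =>
    rw [show t.length = 0 from h, pvLevPre_zero_right]
  · have h0 := pvOuter s t s 0 rfl (by omega)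
    rw [pvRowSpec_zero] at h0
    simp only []
    rw [show s.zipIdx = s.zipIdx 0 from rfl, h0, pvRowSpec_last]

lemma pvGld_eq (s t : List Char) : pvGld s t = pvLevPre s t s.length t.length := by
  unfold pvGld
  split
  · rw [pvGldCore_eq, pvLevPre_symm t s (t.length + s.length) t.length s.length le_rfl]
  · rw [pvGldCore_eq]

lemma pvGld_eq_levB (q k : String) : pvGld q.toList k.toList = pvLevB q k := by
  rw [pvGld_eq]; rfl

-- lower bound in the form used by the prefilter
lemma pvLevB_ge (q k : String) (threshold : Int)
    (h : ¬ |PySem.Str.len q - PySem.Str.len k| ≤ threshold) :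
    ¬ ((pvLevB q k : Int) ≤ threshold) := by
  have hlb := pvLevPre_lb q.toList k.toList (q.toList.length + k.toList.length)
    q.toList.length k.toList.length le_rfl
  have hq : PySem.Str.len q = (q.toList.length : Int) := by
    simp [PySem.Str.len_eq]
  have hk : PySem.Str.len k = (k.toList.length : Int) := by
    simp [PySem.Str.len_eq]
  rw [hq, hk] at h
  unfold pvLevB
  rw [abs_le] at h
  omega

-- ---- generic facts about foldl min ----

lemma pvFoldlMin_le_seed : ∀ (l : List Nat) (a : Nat), l.foldl min a ≤ a := by
  intro l
  induction l with
  | nil => intro a; simp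
  | cons x l ih =>
    intro a
    calc (x :: l).foldl min a = l.foldl min (min a x) := by simp
    _ ≤ min a x := ih _
    _ ≤ a := by omega

lemma pvFoldlMin_le_mem : ∀ (l : List Nat) (a x : Nat), x ∈ l → l.foldl min a ≤ x := by
  intro l
  induction l with
  | nil => intro a x hx; simp at hx
  | cons y l ih =>
    intro a x hx
    rcases List.mem_cons.mp hx with h | h
    · subst h
      calc (x :: l).foldl min a = l.foldl min (min a x) := by simp
      _ ≤ min a x := pvFoldlMin_le_seed _ _
      _ ≤ x := by omega
    · simpa using ih (min a y) x h

lemma pvFoldlMin_mem : ∀ (l : List Nat) (a : Nat), l.foldl min a = a ∨ l.foldl min a ∈ l := by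
  intro l
  induction l with
  | nil => intro a; simp
  | cons y l ih =>
    intro a
    rcases ih (min a y) with h | h
    · by_cases hay : a ≤ y
      · left; simpa [min_eq_left hay] using h
      · right
        have hy : List.foldl min a (y :: l) = y := by
          simp only [List.foldl_cons]; rw [h]; omega
        simp [hy]
    · right; right; simpa using h

-- ---- selection: A's running-best loop vs B's min/index ----

def pvGoodb (threshold : Int) (bd : Option Nat) (d : Nat) : Bool :=
  pvImproves bd d && decide ((d : Int) ≤ threshold)

-- A's step with the distance rewritten through pvGld_eq
def pvStepL (q : String) (thr : Int) (st : Option String × Option Nat) (k : String) :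
    Option String × Option Nat :=
  if pvGoodb thr st.2 (pvLevB q k) then (some k, some (pvLevB q k)) else st

lemma pvStepA_eq_stepL (q : String) (thr : Int) : pvStepA q thr = pvStepL q thr := by
  funext st k
  unfold pvStepA pvStepL pvGoodb
  rw [pvGld_eq_levB]

lemma pvGoodb_none (thr : Int) (d : Nat) :
    pvGoodb thr none d = decide ((d : Int) ≤ thr) := by
  simp [pvGoodb, pvImproves]

lemma pvGoodb_some (thr : Int) (bd : Option Nat) (d0 d : Nat)
    (hImp : pvImproves bd d0 = true) :
    pvGoodb thr (some d0) d = (pvGoodb thr bd d && decide (d < d0)) := by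
  cases bd with
  | none => simp [pvGoodb, pvImproves, Bool.and_comm]
  | some b =>
    simp only [pvImproves, decide_eq_true_eq] at hImp
    by_cases h1 : d < d0
    · have h3 : d < b := lt_trans h1 hImp
      by_cases h2 : (d : Int) ≤ thr <;> simp [pvGoodb, pvImproves, h1, h2, h3]
    · by_cases h2 : (d : Int) ≤ thr <;> simp [pvGoodb, pvImproves, h1, h2]

-- A's loop, characterized: the first key whose eligible distance is minimal
lemma pvAfold (q : String) (thr : Int) :
    ∀ (ks : List String) (b : Option String) (bd : Option Nat),
      (ks.foldl (pvStepL q thr) (b, bd)).1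
        = match PySem.List.min? ((ks.map (fun k => pvLevB q k)).filter (pvGoodb thr bd))
              (fun d => d) with
          | none => b
          | some m => ks.find? (fun k => pvLevB q k == m) := by
  intro ks
  induction ks with
  | nil => intro b bd; simp [PySem.List.min?]
  | cons k0 ks ih =>
    intro b bd
    rw [List.foldl_cons]
    by_cases hC : pvGoodb thr bd (pvLevB q k0) = true
    · have hstep : pvStepL q thr (b, bd) k0 = (some k0, some (pvLevB q k0)) := by
        unfold pvStepL; simp [hC]
      rw [hstep, ih]
      have hImp : pvImproves bd (pvLevB q k0) = true := by
        simp only [pvGoodb, Bool.and_eq_true] at hC; exact hC.1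
      have hfc : ((k0 :: ks).map (fun k => pvLevB q k)).filter (pvGoodb thr bd)
          = pvLevB q k0 :: (ks.map (fun k => pvLevB q k)).filter (pvGoodb thr bd) := by
        simp [hC]
      set d0 := pvLevB q k0 with hd0
      set R := (ks.map (fun k => pvLevB q k)).filter (pvGoodb thr bd) with hR
      have hR' : (ks.map (fun k => pvLevB q k)).filter (pvGoodb thr (some d0))
          = R.filter (fun d => decide (d < d0)) := by
        rw [hR, List.filter_filter]
        apply List.filter_congr
        intro d _
        rw [pvGoodb_some thr bd d0 d hImp, Bool.and_comm]
      rw [hfc, PySem.List.min?_id_cons, hR']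
      set M := R.foldl min d0 with hM
      by_cases hMd : M = d0
      · have hnone : R.filter (fun d => decide (d < d0)) = [] := by
          apply List.filter_eq_nil_iff.mpr
          intro d hd
          have := pvFoldlMin_le_mem R d0 d hd
          simp; omega
        rw [hnone]
        have : PySem.List.min? ([] : List Nat) (fun d => d) = none := by
          simp [PySem.List.min?]
        rw [this]
        show some k0 = List.find? (fun k => pvLevB q k == M) (k0 :: ks)
        rw [List.find?_cons_of_pos (p := fun k => pvLevB q k == M) (by simp [← hd0, hMd])]
      · have hMlt : M < d0 := by
          have := pvFoldlMin_le_seed R d0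
          omega
        have hMR : M ∈ R := by
          rcases pvFoldlMin_mem R d0 with h | h
          · omega
          · exact h
        have hMR' : M ∈ R.filter (fun d => decide (d < d0)) := by
          simp [List.mem_filter, hMR, hMlt]
        cases hmin : PySem.List.min? (R.filter (fun d => decide (d < d0))) (fun d => d) with
        | none =>
          rw [PySem.List.min?_eq_none_iff] at hmin
          rw [hmin] at hMR'
          simp at hMR'
        | some m2 =>
          have hm2mem : m2 ∈ R.filter (fun d => decide (d < d0)) :=
            PySem.List.min?_mem hmin
          have hm2le : m2 ≤ M := PySem.List.min?_isMin hmin M hMR'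
          have hm2R : m2 ∈ R := (List.mem_filter.mp hm2mem).1
          have hMle : M ≤ m2 := pvFoldlMin_le_mem R d0 m2 hm2R
          have hm2M : m2 = M := by omega
          rw [hm2M]
          show List.find? (fun k => pvLevB q k == M) ks
              = List.find? (fun k => pvLevB q k == M) (k0 :: ks)
          rw [List.find?_cons_of_neg (p := fun k => pvLevB q k == M) (by simp only [← hd0, beq_iff_eq]; omega)]
    · have hstep : pvStepL q thr (b, bd) k0 = (b, bd) := by
        unfold pvStepL; simp [hC]
      rw [hstep, ih]
      have hfc : ((k0 :: ks).map (fun k => pvLevB q k)).filter (pvGoodb thr bd)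
          = (ks.map (fun k => pvLevB q k)).filter (pvGoodb thr bd) := by
        simp [hC]
      rw [hfc]
      cases hmin : PySem.List.min? ((ks.map (fun k => pvLevB q k)).filter (pvGoodb thr bd))
          (fun d => d) with
      | none => rfl
      | some m =>
        have hmmem := PySem.List.min?_mem hmin
        have hgood : pvGoodb thr bd m = true := (List.mem_filter.mp hmmem).2
        have hne : pvLevB q k0 ≠ m := by
          intro hEq
          rw [hEq] at hC
          exact hC hgood
        show List.find? (fun k => pvLevB q k == m) ks
            = List.find? (fun k => pvLevB q k == m) (k0 :: ks)
        rw [List.find?_cons_of_neg (p := fun k => pvLevB q k == m) (by simp [hne])]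

-- index into the mapped list, then get: the first element mapping to m
lemma pvIndexGet (l : List String) (f : String → Nat) (m : Nat) :
    (match PySem.List.index? (l.map f) m with
     | none => none
     | some i => PySem.List.pyGet? l (i : Int))
      = l.find? (fun x => f x == m) := by
  induction l with
  | nil => simp [PySem.List.index?_eq_idxOf?, List.idxOf?]
  | cons x l ih =>
    by_cases hx : f x = m
    · rw [List.map_cons, hx, PySem.List.index?_cons_self]
      simp [List.find?_cons_of_pos, hx]
    · rw [List.map_cons, PySem.List.index?_cons_of_ne (l.map f) (by simpa using hx)]
      rw [List.find?_cons_of_neg (p := fun y => f y == m) (by simp [hx])]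
      cases h : PySem.List.index? (l.map f) m with
      | none => rw [h] at ih; simpa using ih
      | some i =>
        rw [h] at ih
        simp only [Option.map_some]
        rw [← ih]
        simp [PySem.List.pyGet?_natCast]

-- the prefiltered eligible list equals the unfiltered one
lemma pvLenFail (q k : String) (thr : Int)
    (hlk : decide (|PySem.Str.len q - PySem.Str.len k| ≤ thr) = false) :
    decide ((pvLevB q k : Int) ≤ thr) = false := by
  apply decide_eq_false
  exact pvLevB_ge q k thr (of_decide_eq_false hlk)

-- the prefiltered eligible list equals the unfiltered one
lemma pvElig (q : String) (thr : Int) (keys : List String) :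
    (((keys.filter (fun t => decide (|PySem.Str.len q - PySem.Str.len t| ≤ thr))).map
        (fun t => pvLevB q t)).filter (fun (d : Nat) => decide ((d : Int) ≤ thr)))
      = ((keys.map (fun k => pvLevB q k)).filter (fun (d : Nat) => decide ((d : Int) ≤ thr))) := by
  induction keys with
  | nil => rfl
  | cons k ks ih =>
    rcases Bool.eq_false_or_eq_true
        (decide (|PySem.Str.len q - PySem.Str.len k| ≤ thr)) with hlk | hlk
    · rw [List.filter_cons_of_pos (p := fun t => decide (|PySem.Str.len q - PySem.Str.len t| ≤ thr)) hlk, List.map_cons, List.map_cons,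
        List.filter_cons, List.filter_cons, ih]
    · rw [List.filter_cons_of_neg (p := fun t => decide (|PySem.Str.len q - PySem.Str.len t| ≤ thr)) (by simp only [hlk]; exact Bool.false_ne_true),
        List.map_cons,
        List.filter_cons_of_neg (p := fun (d : Nat) => decide ((d : Int) ≤ thr))
          (by simp only [pvLenFail q k thr hlk]; exact Bool.false_ne_true), ih]

-- the first minimal key survives the prefilter
lemma pvFindFilter (q : String) (thr : Int) (keys : List String) (m : Nat)
    (hm : (m : Int) ≤ thr) :
    (keys.filter (fun t => decide (|PySem.Str.len q - PySem.Str.len t| ≤ thr))).find?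
        (fun k => pvLevB q k == m)
      = keys.find? (fun k => pvLevB q k == m) := by
  induction keys with
  | nil => rfl
  | cons k ks ih =>
    rcases Bool.eq_false_or_eq_true
        (decide (|PySem.Str.len q - PySem.Str.len k| ≤ thr)) with hlk | hlk
    · rw [List.filter_cons_of_pos (p := fun t => decide (|PySem.Str.len q - PySem.Str.len t| ≤ thr)) hlk, List.find?_cons, List.find?_cons, ih]
    · have hne : (pvLevB q k == m) = false := by
        simp only [beq_eq_false_iff_ne, ne_eq]
        intro hEq
        have := pvLenFail q k thr hlk
        rw [hEq] at this
        simp [hm] at this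
      rw [List.filter_cons_of_neg (p := fun t => decide (|PySem.Str.len q - PySem.Str.len t| ≤ thr)) (by simp only [hlk]; exact Bool.false_ne_true),
        ih, List.find?_cons, hne]

-- B's min/index/getitem, characterized the same way
lemma pvBsel (q : String) (thr : Int) (keys : List String) :
    (let candidates := keys.filter
        (fun t => decide (|PySem.Str.len q - PySem.Str.len t| ≤ thr))
     let ds := candidates.map (fun t => pvLevB q t)
     let eligible := ds.filter (fun (d : Nat) => decide ((d : Int) ≤ thr))
     if eligible.isEmpty then none
     else
       match PySem.List.min? eligible (fun d => d) with
       | none => none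
       | some m =>
         match PySem.List.index? ds m with
         | none => none
         | some i => PySem.List.pyGet? candidates (i : Int))
      = match PySem.List.min? ((keys.map (fun k => pvLevB q k)).filter (pvGoodb thr none))
            (fun d => d) with
        | none => none
        | some m => keys.find? (fun k => pvLevB q k == m) := by
  simp only []
  have hgb : (keys.map (fun k => pvLevB q k)).filter (pvGoodb thr none)
      = (keys.map (fun k => pvLevB q k)).filter (fun (d : Nat) => decide ((d : Int) ≤ thr)) := by
    apply List.filter_congr
    intro d _
    rw [pvGoodb_none]
  rw [hgb, ← pvElig q thr keys]
  set cands := keys.filter (fun t => decide (|PySem.Str.len q - PySem.Str.len t| ≤ thr))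
    with hcands
  set elig := (cands.map (fun t => pvLevB q t)).filter
      (fun (d : Nat) => decide ((d : Int) ≤ thr)) with helig
  by_cases hE : elig.isEmpty
  · rw [if_pos hE]
    have : elig = [] := by simpa using hE
    rw [this]
    simp [PySem.List.min?]
  · rw [if_neg hE]
    cases hmin : PySem.List.min? elig (fun d => d) with
    | none => rfl
    | some m =>
      have hmmem := PySem.List.min?_mem hmin
      have hmthr : (m : Int) ≤ thr := by
        have := (List.mem_filter.mp hmmem).2
        simpa using this
      rw [pvIndexGet cands (fun t => pvLevB q t) m]
      exact pvFindFilter q thr keys m hmthr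

-- ===== VERDICT (by name: the statement is the Claim_ definition above) =====
theorem find_similar_terms_spec : Claim_equal_find_similar_terms := by
  intro q td thr _
  unfold Spec_find_similar_terms find_similar_terms find_similar_terms_alt
  simp only []
  by_cases hmem : q ∈ pvKeys td
  · simp [hmem]
  · simp only [hmem, if_false]
    rw [pvStepA_eq_stepL, pvAfold q thr (pvKeys td) none none, ← pvBsel q thr (pvKeys td)]
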